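-- pv_equiv track=rewrite | github.com/sssx223/SupplyScout | vendor_search_modal.py | deduplicate_and_prioritize_vendors
-- ===== SOURCE A (Python) =====
-- def deduplicate_and_prioritize_vendors(vendors: list[dict]) -> list[dict]:
--     """Groups vendors by name and selects the one with the longest (most specific) URL."""
--     unique_vendors = {}
--     for vendor in vendors:
--         name = vendor.get("vendor_name")
--         if not name:
--             continue
--
--         if name not in unique_vendors:
--             unique_vendors[name] = vendor
--         else:
--             # If the new URL is longer, it's likely more specific (a product page vs a homepage)
--             current_url = unique_vendors[name].get("product_page_url", "")
--             new_url = vendor.get("product_page_url", "")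
--             if len(new_url) > len(current_url):
--                 unique_vendors[name] = vendor
--
--     return list(unique_vendors.values())
-- ===== SOURCE B (Python) =====
-- def deduplicate_and_prioritize_vendors(vendors: list[dict]) -> list[dict]:
--     """Two passes: group vendors by name, then pick the longest-URL vendor per group."""
--     groups = {}
--     for vendor in vendors:
--         name = vendor.get("vendor_name")
--         if not name:
--             continue
--         groups.setdefault(name, []).append(vendor)
--     return [max(group, key=lambda v: len(v.get("product_page_url", "")))
--             for group in groups.values()]
-- ===== Notes on version B (the rewrite author's own statement) =====
-- stated objective: alternative
-- what changed: Replaces A's inline best-so-far dict update with a two-pass group-then-reduce: first build name -> list-of-vendors groups, then select max(group, key=URL length) per group.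
import Mathlib
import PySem

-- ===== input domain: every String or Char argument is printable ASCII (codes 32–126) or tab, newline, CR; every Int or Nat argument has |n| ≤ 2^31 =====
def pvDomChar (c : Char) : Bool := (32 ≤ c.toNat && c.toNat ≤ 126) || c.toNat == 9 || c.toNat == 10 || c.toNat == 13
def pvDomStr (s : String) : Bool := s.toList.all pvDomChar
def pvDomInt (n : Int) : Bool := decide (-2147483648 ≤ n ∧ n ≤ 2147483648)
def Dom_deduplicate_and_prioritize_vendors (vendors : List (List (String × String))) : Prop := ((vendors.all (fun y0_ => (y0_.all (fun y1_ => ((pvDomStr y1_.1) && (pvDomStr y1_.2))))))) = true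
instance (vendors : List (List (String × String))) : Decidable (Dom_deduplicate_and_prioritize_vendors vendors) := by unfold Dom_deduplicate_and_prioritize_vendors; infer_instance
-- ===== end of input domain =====

-- B replaces A's inline best-so-far dict update with two passes (group by name, then pick the
-- longest-URL vendor of each group with max(key=...)): an alternative decomposition, same cost.

-- ===== PORT A =====
def deduplicate_and_prioritize_vendors (vendors : List (List (String × String))) : List (List (String × String)) :=
  (vendors.foldl
    (fun (unique_vendors : PySem.Dict String (List (String × String))) vendor =>
      match (PySem.Dict.mk vendor).get? "vendor_name" with
      | none => unique_vendors
      | some name =>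
        if name = "" then unique_vendors
        else if unique_vendors.contains name = false then unique_vendors.insert name vendor
        else
          let current_url := (PySem.Dict.mk (unique_vendors.getD name [])).getD "product_page_url" ""
          let new_url := (PySem.Dict.mk vendor).getD "product_page_url" ""
          if PySem.Str.len new_url > PySem.Str.len current_url then unique_vendors.insert name vendor
          else unique_vendors)
    PySem.Dict.empty).values

-- ===== PORT B =====
-- key=lambda v: len(v.get("product_page_url", ""))
def pvKey (v : List (String × String)) : Int :=
  PySem.Str.len ((PySem.Dict.mk v).getD "product_page_url" "")

-- first pass: groups.setdefault(name, []).append(vendor)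
def pvGroups (vendors : List (List (String × String))) : PySem.Dict String (List (List (String × String))) :=
  vendors.foldl
    (fun groups vendor =>
      match (PySem.Dict.mk vendor).get? "vendor_name" with
      | none => groups
      | some name => if name = "" then groups else groups.modify name [] (· ++ [vendor]))
    PySem.Dict.empty

def deduplicate_and_prioritize_vendors_alt (vendors : List (List (String × String))) : List (List (String × String)) :=
  (pvGroups vendors).values.map (fun group => (PySem.List.max? group pvKey).getD [])

-- ===== PRECONDITION & SPEC =====
def Spec_deduplicate_and_prioritize_vendors (vendors : List (List (String × String))) (out : List (List (String × String))) : Prop := out = deduplicate_and_prioritize_vendors_alt vendors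
instance (vendors : List (List (String × String))) (out : List (List (String × String))) : Decidable (Spec_deduplicate_and_prioritize_vendors vendors out) := by unfold Spec_deduplicate_and_prioritize_vendors; infer_instance

-- ===== CLAIM (what is proved, stated in full; the proofs are below) =====
def Claim_equal_deduplicate_and_prioritize_vendors : Prop := ∀ (vendors : List (List (String × String))), Dom_deduplicate_and_prioritize_vendors vendors → Spec_deduplicate_and_prioritize_vendors vendors (deduplicate_and_prioritize_vendors vendors)

-- ===== LEMMAS AND PROOFS =====

-- A's loop body, named for the proof
def pvStepA (d : PySem.Dict String (List (String × String))) (vendor : List (String × String)) :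
    PySem.Dict String (List (String × String)) :=
  match (PySem.Dict.mk vendor).get? "vendor_name" with
  | none => d
  | some name =>
    if name = "" then d
    else if d.contains name = false then d.insert name vendor
    else if PySem.Str.len ((PySem.Dict.mk vendor).getD "product_page_url" "") >
        PySem.Str.len ((PySem.Dict.mk (d.getD name [])).getD "product_page_url" "") then
      d.insert name vendor
    else d

-- B's grouping loop body
def pvStepB (d : PySem.Dict String (List (List (String × String)))) (vendor : List (String × String)) :
    PySem.Dict String (List (List (String × String))) :=
  match (PySem.Dict.mk vendor).get? "vendor_name" with
  | none => d
  | some name => if name = "" then d else d.modify name [] (· ++ [vendor])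

def pvBest (g : List (List (String × String))) : List (String × String) :=
  (PySem.List.max? g pvKey).getD []

-- the loop invariant: A's dict is the per-group best of B's dict, key for key in order
def pvInv (dA : PySem.Dict String (List (String × String)))
    (dB : PySem.Dict String (List (List (String × String)))) : Prop :=
  dA.items = dB.items.map (fun p => (p.1, pvBest p.2)) ∧ dB.keys.Nodup ∧ ∀ p ∈ dB.items, p.2 ≠ []

lemma pvInv_keys {dA dB} (h : pvInv dA dB) : dA.keys = dB.keys := by
  simp only [PySem.Dict.keys, h.1, List.map_map]
  rfl

lemma pvBest_append (g : List (List (String × String))) (v : List (String × String)) (hg : g ≠ []) :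
    pvBest (g ++ [v]) = if pvKey (pvBest g) < pvKey v then v else pvBest g := by
  obtain ⟨m, hm⟩ : ∃ m, PySem.List.max? g pvKey = some m := by
    cases h : PySem.List.max? g pvKey with
    | none => exact absurd ((PySem.List.max?_eq_none_iff g pvKey).mp h) hg
    | some m => exact ⟨m, rfl⟩
  have hstep : PySem.List.max? (g ++ [v]) pvKey = if pvKey m < pvKey v then some v else some m := by
    unfold PySem.List.max? at hm ⊢
    rw [List.foldl_append, hm]
    rfl
  simp only [pvBest, hstep, hm, Option.getD_some]
  split_ifs <;> rfl

lemma pvInv_step {dA : PySem.Dict String (List (String × String))}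
    {dB : PySem.Dict String (List (List (String × String)))}
    (h : pvInv dA dB) (v : List (String × String)) :
    pvInv (pvStepA dA v) (pvStepB dB v) := by
  obtain ⟨hitems, hnd, hne⟩ := h
  unfold pvStepA pvStepB
  cases hname : (PySem.Dict.mk v).get? "vendor_name" with
  | none => exact ⟨hitems, hnd, hne⟩
  | some name =>
    by_cases hemp : name = ""
    · simp only [hemp]; exact ⟨hitems, hnd, hne⟩
    simp only [if_neg hemp]
    have hkeys : dA.keys = dB.keys := pvInv_keys ⟨hitems, hnd, hne⟩
    have hcont : dA.contains name = dB.contains name := by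
      rw [PySem.Dict.contains_eq_decide_mem_keys, PySem.Dict.contains_eq_decide_mem_keys, hkeys]
    by_cases hc : dB.contains name = true
    · -- name already a key: B appends to the group, A updates the best on strict >
      rw [hcont, hc]
      rw [if_neg (by simp : ¬ (true = false))]
      have hmemk : name ∈ dB.keys := (PySem.Dict.contains_iff_mem_keys dB name).mp hc
      obtain ⟨p, hpmem, hp1⟩ : ∃ p ∈ dB.items, p.1 = name := by
        simpa [PySem.Dict.keys, List.mem_map] using hmemk
      obtain ⟨g, hg⟩ : ∃ g, (name, g) ∈ dB.items := ⟨p.2, by rw [← hp1]; exact hpmem⟩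
      have hgD : dB.getD name [] = g := PySem.Dict.getD_of_mem_items dB hg hnd []
      have hgne : g ≠ [] := hne _ hg
      have hndA : dA.keys.Nodup := hkeys ▸ hnd
      have hAmem : (name, pvBest g) ∈ dA.items := by
        rw [hitems]; exact List.mem_map.mpr ⟨(name, g), hg, rfl⟩
      have hAD : dA.getD name [] = pvBest g := PySem.Dict.getD_of_mem_items dA hAmem hndA []
      have hmod : dB.modify name [] (· ++ [v]) = dB.insert name (g ++ [v]) := by
        simp [PySem.Dict.modify, hgD]
      have hBitems : (dB.modify name [] (· ++ [v])).items
          = dB.items.map (fun p => if p.1 == name then (name, g ++ [v]) else p) := by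
        rw [hmod, PySem.Dict.items_insert_of_contains _ _ hc]
      have hkeyval : ∀ q ∈ dB.items, q.1 = name → q.2 = g := by
        intro q hq hq1
        have hmemq : (name, q.2) ∈ dB.items := by rw [← hq1]; exact hq
        have h1 := PySem.Dict.getD_of_mem_items dB hmemq hnd []
        rw [hgD] at h1
        exact h1.symm
      have hnd' : (dB.modify name [] (· ++ [v])).keys.Nodup := by
        rw [hmod, PySem.Dict.keys_insert_of_contains _ _ hc]; exact hnd
      have hne' : ∀ p ∈ (dB.modify name [] (· ++ [v])).items, p.2 ≠ [] := by
        rw [hBitems]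
        intro q hq
        obtain ⟨r, hr, hrq⟩ := List.mem_map.mp hq
        by_cases h1 : (r.1 == name) = true
        · rw [if_pos h1] at hrq; rw [← hrq]; simp
        · rw [if_neg h1] at hrq; rw [← hrq]; exact hne r hr
      refine ⟨?_, hnd', hne'⟩
      have hbest : pvBest (g ++ [v]) = if pvKey (pvBest g) < pvKey v then v else pvBest g :=
        pvBest_append g v hgne
      by_cases hcmp : PySem.Str.len ((PySem.Dict.mk v).getD "product_page_url" "")
          > PySem.Str.len ((PySem.Dict.mk (dA.getD name [])).getD "product_page_url" "")
      · -- A replaces: the new vendor is the new best of the extended group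
        rw [if_pos hcmp]
        have hcA : dA.contains name = true := by rw [hcont]; exact hc
        have hkv : pvKey (pvBest g) < pvKey v := by
          simpa [pvKey, hAD, gt_iff_lt] using hcmp
        rw [PySem.Dict.items_insert_of_contains _ _ hcA, hitems, hBitems, List.map_map, List.map_map]
        apply List.map_congr_left
        intro q hq
        by_cases h1 : (q.1 == name) = true
        · have hq2 : q.2 = g := hkeyval q hq (by simpa using h1)
          simp [Function.comp, h1, hbest, hkv]
        · simp [Function.comp, h1]
      · -- A keeps the current vendor: it stays the best of the extended group
        rw [if_neg hcmp]
        have hkv : ¬ pvKey (pvBest g) < pvKey v := by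
          simpa [pvKey, hAD, gt_iff_lt] using hcmp
        rw [hitems, hBitems, List.map_map]
        apply List.map_congr_left
        intro q hq
        by_cases h1 : (q.1 == name) = true
        · have hq2 : q.2 = g := hkeyval q hq (by simpa using h1)
          have hq1 : q.1 = name := by simpa using h1
          simp [Function.comp, hbest, hkv, hq1, hq2]
        · simp [Function.comp, h1]
    · -- fresh name: both sides append a new entry
      have hcB : dB.contains name = false := by simpa using hc
      have hcA : dA.contains name = false := by rw [hcont]; exact hcB
      rw [hcont, hcB, if_pos rfl]
      have hmod : dB.modify name [] (· ++ [v]) = dB.insert name [v] := by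
        simp [PySem.Dict.modify, PySem.Dict.getD_of_not_contains dB [] hcB]
      refine ⟨?_, ?_, ?_⟩
      · rw [PySem.Dict.items_insert_of_not_contains _ _ hcA, hmod,
          PySem.Dict.items_insert_of_not_contains _ _ hcB, List.map_append, hitems]
        simp [pvBest, PySem.List.max?]
      · rw [hmod, PySem.Dict.keys_insert_of_not_contains _ _ hcB]
        have hnm : name ∉ dB.keys := by
          intro hmem
          have hct := (PySem.Dict.contains_iff_mem_keys dB name).mpr hmem
          rw [hcB] at hct
          exact Bool.false_ne_true hct
        simp [List.nodup_append, hnd]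
        intro a ha heq
        exact hnm (heq ▸ ha)
      · rw [hmod, PySem.Dict.items_insert_of_not_contains _ _ hcB]
        intro q hq
        rcases List.mem_append.mp hq with hmm | hmm
        · exact hne q hmm
        · have : q = (name, [v]) := by simpa using hmm
          rw [this]; simp

lemma pvInv_foldl (vendors : List (List (String × String))) :
    ∀ dA dB, pvInv dA dB → pvInv (vendors.foldl pvStepA dA) (vendors.foldl pvStepB dB) := by
  induction vendors with
  | nil => intro dA dB h; exact h
  | cons v t ih =>
    intro dA dB h
    exact ih _ _ (pvInv_step h v)

-- ===== VERDICT (by name: the statement is the Claim_ definition above) =====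
theorem deduplicate_and_prioritize_vendors_spec : Claim_equal_deduplicate_and_prioritize_vendors := by
  intro vendors _
  unfold Spec_deduplicate_and_prioritize_vendors deduplicate_and_prioritize_vendors
    deduplicate_and_prioritize_vendors_alt pvGroups
  have hA : (vendors.foldl
      (fun (unique_vendors : PySem.Dict String (List (String × String))) vendor =>
        match (PySem.Dict.mk vendor).get? "vendor_name" with
        | none => unique_vendors
        | some name =>
          if name = "" then unique_vendors
          else if unique_vendors.contains name = false then unique_vendors.insert name vendor
          else
            let current_url := (PySem.Dict.mk (unique_vendors.getD name [])).getD "product_page_url" ""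
            let new_url := (PySem.Dict.mk vendor).getD "product_page_url" ""
            if PySem.Str.len new_url > PySem.Str.len current_url then unique_vendors.insert name vendor
            else unique_vendors)
      PySem.Dict.empty) = vendors.foldl pvStepA PySem.Dict.empty := rfl
  have hB : (vendors.foldl
      (fun (groups : PySem.Dict String (List (List (String × String)))) vendor =>
        match (PySem.Dict.mk vendor).get? "vendor_name" with
        | none => groups
        | some name => if name = "" then groups else groups.modify name [] (· ++ [vendor]))
      PySem.Dict.empty) = vendors.foldl pvStepB PySem.Dict.empty := rfl
  rw [hA, hB]
  have hinv : pvInv (vendors.foldl pvStepA PySem.Dict.empty) (vendors.foldl pvStepB PySem.Dict.empty) := by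
    apply pvInv_foldl
    exact ⟨rfl, List.nodup_nil, by intro p hp; simp [PySem.Dict.empty] at hp⟩
  simp only [PySem.Dict.values, hinv.1, List.map_map]
  rfl
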